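-- pv_equiv track=rewrite | github.com/lily-mara/algorithms-graph-project | graphinator.py | node_index_table
-- ===== SOURCE A (Python) =====
-- def node_index_table(nodes):
--     tab = {}
--     idx = 0
--
--     for i in nodes:
--         if i not in tab.keys():
--             tab[i] = idx
--             idx += 1
--
--     return tab
-- ===== SOURCE B (Python) =====
-- def node_index_table(nodes):
--     # Repeated head-strip: peel the first element, filter out all its
--     # duplicates from the rest, repeat; then index the peeled sequence.
--     order = []
--     rest = list(nodes)
--     while rest:
--         head = rest[0]
--         order.append(head)
--         rest = [x for x in rest[1:] if x != head]
--     return {node: i for i, node in enumerate(order)}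
-- ===== Notes on version B (the rewrite author's own statement) =====
-- stated objective: alternative
-- what changed: Replaced the single-pass seen-dict with a counter by repeated head-strip-and-filter (selection-style dedup with no membership structure at all), then enumerating the peeled sequence.
import Mathlib
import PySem

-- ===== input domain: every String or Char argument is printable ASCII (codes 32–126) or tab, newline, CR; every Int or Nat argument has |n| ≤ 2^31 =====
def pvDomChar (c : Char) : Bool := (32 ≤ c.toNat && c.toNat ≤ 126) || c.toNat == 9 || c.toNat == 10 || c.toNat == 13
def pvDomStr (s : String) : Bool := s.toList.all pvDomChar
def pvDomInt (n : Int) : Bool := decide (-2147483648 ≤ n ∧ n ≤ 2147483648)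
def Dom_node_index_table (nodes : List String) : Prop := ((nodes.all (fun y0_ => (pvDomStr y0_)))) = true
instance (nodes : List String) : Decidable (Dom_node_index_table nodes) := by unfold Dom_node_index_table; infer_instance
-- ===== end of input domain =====

-- B replaces A's seen-dict single pass by repeated head-strip-and-filter dedup, then enumeration; return values proved equal (alternative algorithm, not faster).

-- ===== PORT A =====
-- A: loop over nodes keeping a dict and a running index; insert unseen keys.
def node_index_table (nodes : List String) : List (String × Int) :=
  (nodes.foldl
    (fun (st : PySem.Dict String Int × Int) i =>
      if st.1.contains i then st
      else (st.1.insert i st.2, st.2 + 1))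
    (PySem.Dict.empty, 0)).1.items

-- ===== PORT B =====
-- B's while loop: peel the head, filter its duplicates out of the rest, repeat.
def pvLayers : List String → List String
  | [] => []
  | h :: t => h :: pvLayers (t.filter (fun x => x ≠ h))
termination_by l => l.length
decreasing_by
  have h := List.length_filter_le (fun x : {x // x ∈ t} => !decide (x.1 = h)) t.attach
  simp at h ⊢
  omega

-- B: the dict comprehension over enumerate(order); its keys are distinct, so it is this list.
def node_index_table_alt (nodes : List String) : List (String × Int) :=
  (PySem.List.enumerate (pvLayers nodes)).map (fun p => (p.2, p.1))

-- ===== PRECONDITION & SPEC =====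
def Spec_node_index_table (nodes : List String) (out : List (String × Int)) : Prop := out = node_index_table_alt nodes
instance (nodes : List String) (out : List (String × Int)) : Decidable (Spec_node_index_table nodes out) := by unfold Spec_node_index_table; infer_instance

-- ===== CLAIM =====
def Claim_equal_node_index_table : Prop := ∀ (nodes : List String), Dom_node_index_table nodes → Spec_node_index_table nodes (node_index_table nodes)

-- ===== LEMMAS AND PROOFS =====

-- the dict A maintains, characterised by its key list
def pvMkDict (seen : List String) : PySem.Dict String Int :=
  PySem.Dict.mk ((PySem.List.enumerate seen).map (fun p => (p.2, p.1)))

lemma pvMkDict_keys (seen : List String) : (pvMkDict seen).keys = seen := by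
  simp [pvMkDict, PySem.Dict.keys, Function.comp_def, PySem.List.map_snd_enumerate]

lemma pvMkDict_contains (seen : List String) (x : String) :
    (pvMkDict seen).contains x = decide (x ∈ seen) := by
  rw [PySem.Dict.contains_eq_decide_mem_keys, pvMkDict_keys]

lemma pvMkDict_append (seen : List String) (x : String) (hx : x ∉ seen) :
    (pvMkDict seen).insert x (seen.length : Int) = pvMkDict (seen ++ [x]) := by
  apply PySem.Dict.ext
  rw [PySem.Dict.items_insert_of_not_contains]
  · simp [pvMkDict, PySem.List.enumerate_append,
      PySem.List.enumerate_cons, PySem.List.enumerate_nil]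
  · rw [pvMkDict_contains]; simp [hx]

lemma pv_loop (nodes seen : List String) :
    nodes.foldl
      (fun (st : PySem.Dict String Int × Int) i =>
        if st.1.contains i then st
        else (st.1.insert i st.2, st.2 + 1))
      (pvMkDict seen, (seen.length : Int))
    = (pvMkDict (PySem.Set.update seen nodes),
       ((PySem.Set.update seen nodes).length : Int)) := by
  induction nodes generalizing seen with
  | nil => simp [PySem.Set.update]
  | cons x xs ih =>
      simp only [List.foldl_cons]
      by_cases hx : x ∈ seen
      · rw [if_pos (by rw [pvMkDict_contains]; simpa)]
        rw [ih seen]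
        simp [PySem.Set.update, PySem.Set.add, hx]
      · rw [if_neg (by rw [pvMkDict_contains]; simp [hx])]
        have hstep : ((pvMkDict seen).insert x ((seen.length : Int)), (seen.length : Int) + 1)
            = (pvMkDict (seen ++ [x]), ((seen ++ [x]).length : Int)) := by
          rw [pvMkDict_append seen x hx]
          congr 1
          simp
        rw [hstep, ih (seen ++ [x])]
        simp [PySem.Set.update, PySem.Set.add, hx]

-- filtering out elements already in the accumulator does not change Set.update
lemma pv_update_filter (xs : List String) (s : List String) (a : String) (ha : a ∈ s) :
    PySem.Set.update s xs = PySem.Set.update s (xs.filter (fun x => x ≠ a)) := by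
  induction xs generalizing s with
  | nil => rfl
  | cons x t ih =>
      by_cases hx : x = a
      · subst hx
        have hadd : PySem.Set.add s x = s := by simp [PySem.Set.add, ha]
        have h' := ih s ha
        simp only [decide_not] at h'
        simp only [PySem.Set.update, List.filter_cons, decide_not] at h' ⊢
        simpa [hadd] using h' 
      · simp only [List.filter_cons, decide_not, hx, decide_false, Bool.not_false, if_true]
        have hmem : a ∈ PySem.Set.add s x := by
          simp [PySem.Set.add]; split <;> simp [ha]
        simp [PySem.Set.update] at ih ⊢
        exact ih _ hmem

lemma pv_update_cons (xs : List String) (a : String) (s : List String) (ha : a ∉ xs) :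
    PySem.Set.update (a :: s) xs = a :: PySem.Set.update s xs := by
  induction xs generalizing s with
  | nil => rfl
  | cons x t ih =>
      have hxa : ¬ (x = a) := by rintro rfl; exact ha (List.mem_cons_self)
      have hadd : PySem.Set.add (a :: s) x = a :: PySem.Set.add s x := by
        simp only [PySem.Set.add]
        split <;> split <;> simp_all
      simp only [PySem.Set.update, List.foldl_cons] at ih ⊢
      rw [hadd, ih _ (fun h => ha (List.mem_cons_of_mem _ h))]

-- B's peel-and-filter loop computes exactly the first-occurrence dedup A's dict keys trace out
lemma pvLayers_eq_update_aux (n : Nat) : ∀ (nodes : List String), nodes.length ≤ n →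
    pvLayers nodes = PySem.Set.update [] nodes := by
  induction n with
  | zero =>
      intro nodes hlen
      have : nodes = [] := List.eq_nil_of_length_eq_zero (Nat.le_zero.mp hlen)
      subst this; rw [pvLayers]; rfl
  | succ n ihn =>
      intro nodes hlen
      match nodes with
      | [] => rw [pvLayers]; rfl
      | h :: t =>
      have h1 : PySem.Set.update ([] : List String) (h :: t)
          = PySem.Set.update [h] t := by
        simp [PySem.Set.update, PySem.Set.add]
      have h2 : PySem.Set.update ([h] : List String) t
          = PySem.Set.update [h] (t.filter (fun x => x ≠ h)) :=
        pv_update_filter t [h] h (by simp)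
      have h3 : PySem.Set.update ([h] : List String) (t.filter (fun x => x ≠ h))
          = h :: PySem.Set.update [] (t.filter (fun x => x ≠ h)) :=
        pv_update_cons _ h [] (by simp)
      have hflen : (t.filter (fun x => x ≠ h)).length ≤ n := by
        have := List.length_filter_le (fun x => decide (x ≠ h)) t
        simp only [List.length_cons] at hlen
        omega
      rw [pvLayers, ihn _ hflen, h1, h2, h3]

lemma pvLayers_eq_update (nodes : List String) :
    pvLayers nodes = PySem.Set.update [] nodes :=
  pvLayers_eq_update_aux nodes.length nodes le_rfl

-- ===== VERDICT =====
theorem node_index_table_spec : Claim_equal_node_index_table := by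
  intro nodes _
  show node_index_table nodes = node_index_table_alt nodes
  have hempty : (PySem.Dict.empty : PySem.Dict String Int) = pvMkDict [] := by
    simp [pvMkDict, PySem.Dict.empty, PySem.List.enumerate_nil]
  have h0 : (0 : Int) = (([] : List String).length : Int) := by simp
  unfold node_index_table
  rw [hempty, h0, pv_loop]
  simp [node_index_table_alt, pvMkDict, pvLayers_eq_update]
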